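-- pv_equiv track=rewrite | github.com/JamalUcal/email-test-bot-jamal | scripts/load_historical_prices.py | find_supplier_config
-- ===== SOURCE A (Python) =====
-- from typing import Dict, List, Any, Optional
--
-- def find_supplier_config(
--     supplier_name: str,
--     brand_name: str,
--     supplier_configs: List[Dict]
-- ) -> Optional[Dict]:
--     """
--     Find supplier config matching supplier name and brand.
--
--     Args:
--         supplier_name: Supplier name from filename
--         brand_name: Brand name from filename
--         supplier_configs: List of supplier configurations
--
--     Returns:
--         Supplier config dict or None if not found
--     """
--     supplier_name_upper = supplier_name.upper()
--
--     for supplier in supplier_configs: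
--         if supplier.get('supplier', '').upper() == supplier_name_upper:
--             return supplier
--
--     # Try partial match
--     for supplier in supplier_configs:
--         if supplier_name_upper in supplier.get('supplier', '').upper():
--             return supplier
--         if supplier.get('supplier', '').upper() in supplier_name_upper:
--             return supplier
--
--     return None
-- ===== SOURCE B (Python) =====
-- def find_supplier_config(supplier_name, brand_name, supplier_configs):
--     """Single pass: return the first exact match immediately; remember the
--     first partial match and fall back to it after the loop."""
--     supplier_name_upper = supplier_name.upper()
--     partial = None
--     for supplier in supplier_configs:
--         s = supplier.get('supplier', '').upper()
--         if s == supplier_name_upper: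
--             return supplier
--         if partial is None and (supplier_name_upper in s or s in supplier_name_upper):
--             partial = supplier
--     return partial
-- ===== Notes on version B (the rewrite author's own statement) =====
-- stated objective: simpler
-- what changed: Fuses A's two scans (exact pass then partial pass) into one pass that returns an exact match immediately and keeps the first partial match in an accumulator as fallback.
import Mathlib
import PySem

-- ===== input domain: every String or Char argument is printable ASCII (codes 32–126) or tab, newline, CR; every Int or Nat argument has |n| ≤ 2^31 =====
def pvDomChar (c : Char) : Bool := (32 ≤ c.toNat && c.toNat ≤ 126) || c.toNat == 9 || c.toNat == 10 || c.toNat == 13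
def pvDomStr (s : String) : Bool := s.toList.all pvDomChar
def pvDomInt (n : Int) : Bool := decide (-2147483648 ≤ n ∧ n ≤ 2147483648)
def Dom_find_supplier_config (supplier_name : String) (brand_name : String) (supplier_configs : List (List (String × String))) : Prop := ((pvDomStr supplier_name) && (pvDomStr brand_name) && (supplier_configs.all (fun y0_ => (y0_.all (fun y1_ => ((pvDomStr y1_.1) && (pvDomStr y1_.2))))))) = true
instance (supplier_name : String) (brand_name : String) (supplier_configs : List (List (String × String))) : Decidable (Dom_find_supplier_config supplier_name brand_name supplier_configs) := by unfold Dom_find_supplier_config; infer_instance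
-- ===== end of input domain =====

-- B fuses A's two scans into one pass with a first-partial-match accumulator (same result, simpler control flow; not claimed faster).

-- ===== PORT A =====
-- first loop of A: first config whose uppercased 'supplier' equals supplier_name_upper
def pvExactLoop (u : String) : List (List (String × String)) → Option (List (String × String))
  | [] => none
  | d :: rest =>
    if PySem.Str.upper ((PySem.Dict.mk d).getD "supplier" "") == u then some d
    else pvExactLoop u rest

-- second loop of A: first config matching partially (two one-directional substring tests, in A's order)
def pvPartialLoop (u : String) : List (List (String × String)) → Option (List (String × String))
  | [] => none
  | d :: rest =>
    if PySem.Str.isIn u (PySem.Str.upper ((PySem.Dict.mk d).getD "supplier" "")) then some d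
    else if PySem.Str.isIn (PySem.Str.upper ((PySem.Dict.mk d).getD "supplier" "")) u then some d
    else pvPartialLoop u rest

def find_supplier_config (supplier_name : String) (brand_name : String) (supplier_configs : List (List (String × String))) : Option (List (String × String)) :=
  let u := PySem.Str.upper supplier_name
  match pvExactLoop u supplier_configs with
  | some d => some d
  | none => pvPartialLoop u supplier_configs

-- ===== PORT B =====
-- B's single pass: return an exact match at once, remember the first partial match
def pvFusedLoop (u : String) (cfgs : List (List (String × String))) (partial_ : Option (List (String × String))) : Option (List (String × String)) :=
  match cfgs with
  | [] => partial_
  | d :: rest =>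
    let s := PySem.Str.upper ((PySem.Dict.mk d).getD "supplier" "")
    if s == u then some d
    else if partial_.isNone && (PySem.Str.isIn u s || PySem.Str.isIn s u) then
      pvFusedLoop u rest (some d)
    else pvFusedLoop u rest partial_

def find_supplier_config_alt (supplier_name : String) (brand_name : String) (supplier_configs : List (List (String × String))) : Option (List (String × String)) :=
  pvFusedLoop (PySem.Str.upper supplier_name) supplier_configs none

-- ===== PRECONDITION & SPEC =====
def Spec_find_supplier_config (supplier_name : String) (brand_name : String) (supplier_configs : List (List (String × String))) (out : Option (List (String × String))) : Prop := out = find_supplier_config_alt supplier_name brand_name supplier_configs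
instance (supplier_name : String) (brand_name : String) (supplier_configs : List (List (String × String))) (out : Option (List (String × String))) : Decidable (Spec_find_supplier_config supplier_name brand_name supplier_configs out) := by unfold Spec_find_supplier_config; infer_instance

-- ===== CLAIM (what is proved, stated in full; the proofs are below) =====
def Claim_equal_find_supplier_config : Prop := ∀ (supplier_name : String) (brand_name : String) (supplier_configs : List (List (String × String))), Dom_find_supplier_config supplier_name brand_name supplier_configs → Spec_find_supplier_config supplier_name brand_name supplier_configs (find_supplier_config supplier_name brand_name supplier_configs)

-- ===== LEMMAS AND PROOFS =====
-- the fused loop, with accumulator p, computes: first exact match, else p, else first partial match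
theorem pvFusedLoop_eq (u : String) (cfgs : List (List (String × String))) (p : Option (List (String × String))) :
    pvFusedLoop u cfgs p =
      match pvExactLoop u cfgs with
      | some d => some d
      | none =>
        match p with
        | some q => some q
        | none => pvPartialLoop u cfgs := by
  induction cfgs generalizing p with
  | nil => cases p <;> simp [pvFusedLoop, pvExactLoop, pvPartialLoop]
  | cons d rest ih =>
    by_cases hx : (PySem.Str.upper ((PySem.Dict.mk d).getD "supplier" "") == u) = true
    · simp [pvFusedLoop, pvExactLoop, hx]
    · cases p with
      | some q =>
        simp only [pvFusedLoop, pvExactLoop, hx, Bool.false_eq_true, if_false,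
          Option.isNone_some, Bool.false_and, ih]
      | none =>
        by_cases h1 : PySem.Chars.isIn u.toList
            (PySem.Chars.upper ((PySem.Dict.mk d).getD "supplier" "").toList) = true
        · simp [pvFusedLoop, pvExactLoop, pvPartialLoop, hx, h1, ih]
        · by_cases h2 : PySem.Chars.isIn
              (PySem.Chars.upper ((PySem.Dict.mk d).getD "supplier" "").toList) u.toList = true
          · simp [pvFusedLoop, pvExactLoop, pvPartialLoop, hx, h1, h2, ih]
          · simp [pvFusedLoop, pvExactLoop, pvPartialLoop, hx, h1, h2, ih]

-- ===== VERDICT (by name: the statement is the Claim_ definition above) =====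
theorem find_supplier_config_spec : Claim_equal_find_supplier_config := by
  intro sn bn cfgs _
  unfold Spec_find_supplier_config find_supplier_config find_supplier_config_alt
  rw [pvFusedLoop_eq]
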